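-- pv_equiv track=rewrite | github.com/Ishita-29/CV-analysis-system | app/utils.py | extract_education_degree_level
-- ===== SOURCE A (Python) =====
-- def extract_education_degree_level(education_text: str) -> int:
--     """
--     Extract education degree level from education text.
--     Higher number means higher education level.
--
--     Args:
--         education_text: Education text to extract level from
--
--     Returns:
--         int: Education level (0-5)
--     """
--     education_text = education_text.lower()
--
--     # Define education levels
--     levels = {
--         "phd": 5,
--         "doctorate": 5,
--         "doctoral": 5,
--         "master": 4,
--         "msc": 4,
--         "ms ": 4,
--         "ma ": 4,
--         "mba": 4,
--         "bachelor": 3,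
--         "bsc": 3,
--         "bs ": 3,
--         "ba ": 3,
--         "undergraduate": 3,
--         "associate": 2,
--         "diploma": 2,
--         "certificate": 1,
--         "high school": 0,
--         "ged": 0
--     }
--
--     highest_level = 0
--     for degree, level in levels.items():
--         if degree in education_text:
--             highest_level = max(highest_level, level)
--
--     return highest_level
-- ===== SOURCE B (Python) =====
-- def extract_education_degree_level(education_text: str) -> int:
--     """Grouped descending scan: return the highest level whose keyword group
--     has a substring match, short-circuiting instead of scanning all keywords."""
--     text = education_text.lower()
--     groups = [
--         (5, ["phd", "doctorate", "doctoral"]),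
--         (4, ["master", "msc", "ms ", "ma ", "mba"]),
--         (3, ["bachelor", "bsc", "bs ", "ba ", "undergraduate"]),
--         (2, ["associate", "diploma"]),
--         (1, ["certificate"]),
--     ]
--     for level, keywords in groups:
--         if any(kw in text for kw in keywords):
--             return level
--     return 0
-- ===== Notes on version B (the rewrite author's own statement) =====
-- stated objective: alternative
-- what changed: B groups keywords by level and scans levels from highest to lowest, returning the first level with any substring match (short-circuit), instead of A's full scan over a flat dict accumulating a running max; the level-0 keywords, which can never change the result, disappear.
import Mathlib
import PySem

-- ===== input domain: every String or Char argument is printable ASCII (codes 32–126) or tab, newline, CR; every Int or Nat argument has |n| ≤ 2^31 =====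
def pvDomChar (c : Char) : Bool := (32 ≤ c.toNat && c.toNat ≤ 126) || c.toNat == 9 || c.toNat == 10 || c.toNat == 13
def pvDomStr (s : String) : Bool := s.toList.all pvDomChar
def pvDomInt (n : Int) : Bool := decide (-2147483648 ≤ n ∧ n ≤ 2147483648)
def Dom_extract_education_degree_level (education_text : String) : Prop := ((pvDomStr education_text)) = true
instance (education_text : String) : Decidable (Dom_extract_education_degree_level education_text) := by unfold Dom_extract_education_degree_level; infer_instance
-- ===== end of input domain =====

-- B groups keywords by level and scans levels high→low, returning the first level with a
-- substring match, instead of A's flat scan over all keywords accumulating a running max.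

-- ===== PORT A =====
def extract_education_degree_level (education_text : String) : Int :=
  let t := PySem.Str.lower education_text
  let levels : List (String × Int) :=
    [("phd", 5), ("doctorate", 5), ("doctoral", 5),
     ("master", 4), ("msc", 4), ("ms ", 4), ("ma ", 4), ("mba", 4),
     ("bachelor", 3), ("bsc", 3), ("bs ", 3), ("ba ", 3), ("undergraduate", 3),
     ("associate", 2), ("diploma", 2),
     ("certificate", 1),
     ("high school", 0), ("ged", 0)]
  levels.foldl (fun highest_level dl =>
    if PySem.Str.isIn dl.1 t then max highest_level dl.2 else highest_level) 0

-- ===== PORT B =====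
def pvAltScan (t : String) : List (Int × List String) → Int
  | [] => 0
  | (level, kws) :: rest =>
      if kws.any (fun kw => PySem.Str.isIn kw t) then level else pvAltScan t rest

def extract_education_degree_level_alt (education_text : String) : Int :=
  let t := PySem.Str.lower education_text
  pvAltScan t
    [(5, ["phd", "doctorate", "doctoral"]),
     (4, ["master", "msc", "ms ", "ma ", "mba"]),
     (3, ["bachelor", "bsc", "bs ", "ba ", "undergraduate"]),
     (2, ["associate", "diploma"]),
     (1, ["certificate"])]

-- ===== PRECONDITION & SPEC =====
def Spec_extract_education_degree_level (education_text : String) (out : Int) : Prop := out = extract_education_degree_level_alt education_text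
instance (education_text : String) (out : Int) : Decidable (Spec_extract_education_degree_level education_text out) := by unfold Spec_extract_education_degree_level; infer_instance

-- ===== CLAIM (what is proved, stated in full; the proofs are below) =====
def Claim_equal_extract_education_degree_level : Prop := ∀ (education_text : String), Dom_extract_education_degree_level education_text → Spec_extract_education_degree_level education_text (extract_education_degree_level education_text)

-- ===== LEMMAS AND PROOFS =====

-- A's loop body, abstracted over the substring test c.
def pvStep (c : String → Bool) (h : Int) (dl : String × Int) : Int :=
  if c dl.1 then max h dl.2 else h

-- folding one keyword group (all at level l): acc picks up max with l iff any keyword matches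
theorem pv_fold_group (c : String → Bool) (l : Int) (kws : List String)
    (rest : List (String × Int)) (h : Int) :
    (kws.map (fun d => (d, l)) ++ rest).foldl (pvStep c) h
      = if kws.any c then rest.foldl (pvStep c) (max h l) else rest.foldl (pvStep c) h := by
  induction kws generalizing h with
  | nil => simp
  | cons d kws ih =>
      simp only [List.map_cons, List.cons_append, List.foldl_cons, List.any_cons, pvStep]
      rcases Bool.eq_false_or_eq_true (c d) with hc | hc <;>
        simp only [hc, Bool.false_or, Bool.true_or, Bool.false_eq_true, if_false,
          if_true]
      · rw [ih (max h l)]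
        rcases Bool.eq_false_or_eq_true (kws.any c) with ha | ha <;>
          simp [ha]
      · exact ih h

-- ===== VERDICT (by name: the statement is the Claim_ definition above) =====
theorem extract_education_degree_level_spec : Claim_equal_extract_education_degree_level := by
  intro s _
  unfold Spec_extract_education_degree_level extract_education_degree_level extract_education_degree_level_alt
  set c : String → Bool := fun kw => PySem.Str.isIn kw (PySem.Str.lower s) with hc
  show ((["phd", "doctorate", "doctoral"].map (fun d => (d, (5:Int))) ++
        (["master", "msc", "ms ", "ma ", "mba"].map (fun d => (d, (4:Int))) ++
        (["bachelor", "bsc", "bs ", "ba ", "undergraduate"].map (fun d => (d, (3:Int))) ++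
        (["associate", "diploma"].map (fun d => (d, (2:Int))) ++
        (["certificate"].map (fun d => (d, (1:Int))) ++
        (["high school", "ged"].map (fun d => (d, (0:Int))) ++ [])))))).foldl (pvStep c) 0) = _
  simp only [pv_fold_group, List.foldl_nil]
  simp only [pvAltScan, List.any_cons, List.any_nil, Bool.or_false]
  split_ifs <;> norm_num
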